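-- pv_equiv track=rewrite | github.com/cyrex562/monitor | net/ethernet.py | compare_mac_addr
-- ===== SOURCE A (Python) =====
-- def compare_mac_addr(mac_a, mac_b):
--     """
--     compare two mac addresses represented by lists of bytes
--     :param mac_a:
--     :param mac_b:
--     :return: 0 if equal, -1 if a < b, 1 if a > b
--     """
--     _map = []
--     for i in range(6):
--         if mac_a[i] < mac_b[i]:
--             _map.append(-1)
--         elif mac_a[i] == mac_b[i]:
--             _map.append(0)
--         else:
--             _map.append(1)
--     if _map == [0, 0, 0, 0, 0, 0]:
--         return 0
--     elif _map[0] == -1 or \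
--                     _map[:2] == [0, -1] or \
--                     _map[:3] == [0, 0, -1] or \
--                     _map[:4] == [0, 0, 0, -1] or \
--                     _map[:5] == [0, 0, 0, 0, -1] or \
--                     _map == [0, 0, 0, 0, 0, -1]:
--         return -1
--     elif _map[0] == 1 or \
--                     _map[:2] == [0, 1] or \
--                     _map[:3] == [0, 0, 1] or \
--                     _map[:4] == [0, 0, 0, 1] or \
--                     _map[:5] == [0, 0, 0, 0, 1] or \
--                     _map == [0, 0, 0, 0, 0, 1]:
--         return 1
--     raise ValueError("invalid comparison result")
-- ===== SOURCE B (Python) =====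
-- def compare_mac_addr(mac_a, mac_b):
--     """
--     compare two mac addresses represented by lists of bytes
--     :return: 0 if equal, -1 if a < b, 1 if a > b
--     """
--     pairs = [(mac_a[i], mac_b[i]) for i in range(6)]
--     for x, y in pairs:
--         if x < y:
--             return -1
--         if x > y:
--             return 1
--     return 0
-- ===== Notes on version B (the rewrite author's own statement) =====
-- stated objective: simpler
-- what changed: B replaces A's two-phase structure (build a 6-entry comparison table, then match its prefixes against hard-coded slice patterns) with reading the six byte pairs and one early-exit scan over them.
import Mathlib
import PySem

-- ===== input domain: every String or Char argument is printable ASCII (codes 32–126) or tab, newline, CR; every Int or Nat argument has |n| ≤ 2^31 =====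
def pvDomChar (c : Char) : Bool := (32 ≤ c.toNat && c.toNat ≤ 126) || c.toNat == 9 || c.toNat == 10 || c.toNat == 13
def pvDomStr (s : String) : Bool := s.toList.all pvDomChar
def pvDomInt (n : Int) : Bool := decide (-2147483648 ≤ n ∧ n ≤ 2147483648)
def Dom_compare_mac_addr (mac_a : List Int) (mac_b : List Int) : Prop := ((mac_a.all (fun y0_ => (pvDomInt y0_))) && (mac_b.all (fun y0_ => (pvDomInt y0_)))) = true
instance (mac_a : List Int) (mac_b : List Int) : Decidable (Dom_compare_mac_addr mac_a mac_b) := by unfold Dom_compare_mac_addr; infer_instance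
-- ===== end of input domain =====

-- B reads the six byte pairs and does one early-exit scan, replacing A's comparison table + prefix pattern-matching (objective: simpler).
-- ===== PORT A =====
def compare_mac_addr (mac_a : List Int) (mac_b : List Int) : Int :=
  let _map : List Int := (PySem.List.pyRange 0 6 1).foldl (fun m i =>
      m ++ [if PySem.List.pyGetD mac_a i 0 < PySem.List.pyGetD mac_b i 0 then -1
            else if PySem.List.pyGetD mac_a i 0 = PySem.List.pyGetD mac_b i 0 then 0
            else 1]) []
  if _map = [0, 0, 0, 0, 0, 0] then 0
  else if PySem.List.pyGetD _map 0 0 = -1 ∨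
      PySem.List.slice _map none (some 2) = [0, -1] ∨
      PySem.List.slice _map none (some 3) = [0, 0, -1] ∨
      PySem.List.slice _map none (some 4) = [0, 0, 0, -1] ∨
      PySem.List.slice _map none (some 5) = [0, 0, 0, 0, -1] ∨
      _map = [0, 0, 0, 0, 0, -1] then -1
  else if PySem.List.pyGetD _map 0 0 = 1 ∨
      PySem.List.slice _map none (some 2) = [0, 1] ∨
      PySem.List.slice _map none (some 3) = [0, 0, 1] ∨
      PySem.List.slice _map none (some 4) = [0, 0, 0, 1] ∨
      PySem.List.slice _map none (some 5) = [0, 0, 0, 0, 1] ∨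
      _map = [0, 0, 0, 0, 0, 1] then 1
  else 0  -- unreachable: 'raise ValueError' in A (every _map entry is -1/0/1, so a branch above always fires)

-- ===== PORT B =====
def compare_mac_addr_alt_go : List (Int × Int) → Int
  | [] => 0
  | (x, y) :: rest =>
    if x < y then -1
    else if x > y then 1
    else compare_mac_addr_alt_go rest

def compare_mac_addr_alt (mac_a : List Int) (mac_b : List Int) : Int :=
  compare_mac_addr_alt_go
    ((PySem.List.pyRange 0 6 1).map (fun i => (PySem.List.pyGetD mac_a i 0, PySem.List.pyGetD mac_b i 0)))

-- ===== PRECONDITION & SPEC =====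
-- A indexes mac_a[i], mac_b[i] for i in range(6): on lists shorter than 6 it raises IndexError (B raises too).
def Pre_compare_mac_addr (mac_a : List Int) (mac_b : List Int) : Prop :=
  6 ≤ mac_a.length ∧ 6 ≤ mac_b.length
instance (mac_a : List Int) (mac_b : List Int) : Decidable (Pre_compare_mac_addr mac_a mac_b) := by
  unfold Pre_compare_mac_addr; infer_instance
def pvWitness_compare_mac_addr : List Int × List Int :=
  ([0, 1, 2, 3, 4, 5], [0, 1, 2, 3, 4, 6])
def Spec_compare_mac_addr (mac_a : List Int) (mac_b : List Int) (out : Int) : Prop := out = compare_mac_addr_alt mac_a mac_b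
instance (mac_a : List Int) (mac_b : List Int) (out : Int) : Decidable (Spec_compare_mac_addr mac_a mac_b out) := by unfold Spec_compare_mac_addr; infer_instance

-- ===== CLAIM (what is proved, stated in full; the proofs are below) =====
def Claim_equal_compare_mac_addr : Prop := ∀ (mac_a : List Int) (mac_b : List Int), Dom_compare_mac_addr mac_a mac_b → Pre_compare_mac_addr mac_a mac_b → Spec_compare_mac_addr mac_a mac_b (compare_mac_addr mac_a mac_b)

-- ===== LEMMAS AND PROOFS =====
theorem compare_mac_addr_eq_alt (a0 a1 a2 a3 a4 a5 b0 b1 b2 b3 b4 b5 : Int)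
    (ta tb : List Int) :
    compare_mac_addr (a0 :: a1 :: a2 :: a3 :: a4 :: a5 :: ta) (b0 :: b1 :: b2 :: b3 :: b4 :: b5 :: tb)
      = compare_mac_addr_alt (a0 :: a1 :: a2 :: a3 :: a4 :: a5 :: ta) (b0 :: b1 :: b2 :: b3 :: b4 :: b5 :: tb) := by
  have hr : PySem.List.pyRange 0 6 1 = [0, 1, 2, 3, 4, 5] := by decide
  have f0 : ∀ x0 x1 x2 x3 x4 x5 : Int, ∀ t : List Int,
      PySem.List.pyGetD (x0 :: x1 :: x2 :: x3 :: x4 :: x5 :: t) (0 : Int) 0 = x0 := by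
    intro x0 x1 x2 x3 x4 x5 t
    rw [show ((0 : Int)) = ((0 : Nat) : Int) from rfl, PySem.List.pyGetD_natCast]; rfl
  have f1 : ∀ x0 x1 x2 x3 x4 x5 : Int, ∀ t : List Int,
      PySem.List.pyGetD (x0 :: x1 :: x2 :: x3 :: x4 :: x5 :: t) (1 : Int) 0 = x1 := by
    intro x0 x1 x2 x3 x4 x5 t
    rw [show ((1 : Int)) = ((1 : Nat) : Int) from rfl, PySem.List.pyGetD_natCast]; rfl
  have f2 : ∀ x0 x1 x2 x3 x4 x5 : Int, ∀ t : List Int,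
      PySem.List.pyGetD (x0 :: x1 :: x2 :: x3 :: x4 :: x5 :: t) (2 : Int) 0 = x2 := by
    intro x0 x1 x2 x3 x4 x5 t
    rw [show ((2 : Int)) = ((2 : Nat) : Int) from rfl, PySem.List.pyGetD_natCast]; rfl
  have f3 : ∀ x0 x1 x2 x3 x4 x5 : Int, ∀ t : List Int,
      PySem.List.pyGetD (x0 :: x1 :: x2 :: x3 :: x4 :: x5 :: t) (3 : Int) 0 = x3 := by
    intro x0 x1 x2 x3 x4 x5 t
    rw [show ((3 : Int)) = ((3 : Nat) : Int) from rfl, PySem.List.pyGetD_natCast]; rfl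
  have f4 : ∀ x0 x1 x2 x3 x4 x5 : Int, ∀ t : List Int,
      PySem.List.pyGetD (x0 :: x1 :: x2 :: x3 :: x4 :: x5 :: t) (4 : Int) 0 = x4 := by
    intro x0 x1 x2 x3 x4 x5 t
    rw [show ((4 : Int)) = ((4 : Nat) : Int) from rfl, PySem.List.pyGetD_natCast]; rfl
  have f5 : ∀ x0 x1 x2 x3 x4 x5 : Int, ∀ t : List Int,
      PySem.List.pyGetD (x0 :: x1 :: x2 :: x3 :: x4 :: x5 :: t) (5 : Int) 0 = x5 := by
    intro x0 x1 x2 x3 x4 x5 t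
    rw [show ((5 : Int)) = ((5 : Nat) : Int) from rfl, PySem.List.pyGetD_natCast]; rfl
  simp only [compare_mac_addr, compare_mac_addr_alt, hr, List.foldl, List.map,
    f0, f1, f2, f3, f4, f5]
  rcases lt_trichotomy a0 b0 with h0 | h0 | h0
  · simp [compare_mac_addr_alt_go, PySem.List.slice, h0]
  · subst h0
    rcases lt_trichotomy a1 b1 with h1 | h1 | h1
    · simp [compare_mac_addr_alt_go, PySem.List.slice, h1]
    · subst h1
      rcases lt_trichotomy a2 b2 with h2 | h2 | h2
      · simp [compare_mac_addr_alt_go, PySem.List.slice, h2]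
      · subst h2
        rcases lt_trichotomy a3 b3 with h3 | h3 | h3
        · simp [compare_mac_addr_alt_go, PySem.List.slice, h3]
        · subst h3
          rcases lt_trichotomy a4 b4 with h4 | h4 | h4
          · simp [compare_mac_addr_alt_go, PySem.List.slice, h4]
          · subst h4
            rcases lt_trichotomy a5 b5 with h5 | h5 | h5
            · simp [compare_mac_addr_alt_go, PySem.List.slice, h5]
            · subst h5
              simp [compare_mac_addr_alt_go, PySem.List.slice]
            · simp [compare_mac_addr_alt_go, PySem.List.slice, h5,
                not_lt_of_gt h5, (ne_of_lt h5).symm]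
          · simp [compare_mac_addr_alt_go, PySem.List.slice, h4,
              not_lt_of_gt h4, (ne_of_lt h4).symm]
        · simp [compare_mac_addr_alt_go, PySem.List.slice, h3,
            not_lt_of_gt h3, (ne_of_lt h3).symm]
      · simp [compare_mac_addr_alt_go, PySem.List.slice, h2,
          not_lt_of_gt h2, (ne_of_lt h2).symm]
    · simp [compare_mac_addr_alt_go, PySem.List.slice, h1,
        not_lt_of_gt h1, (ne_of_lt h1).symm]
  · simp [compare_mac_addr_alt_go, PySem.List.slice, h0,
      not_lt_of_gt h0, (ne_of_lt h0).symm]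

-- ===== VERDICT (by name: the statement is the Claim_ definition above) =====
theorem compare_mac_addr_spec : Claim_equal_compare_mac_addr := by
  intro mac_a mac_b _ hpre
  obtain ⟨ha, hb⟩ := hpre
  match mac_a, ha, mac_b, hb with
  | a0 :: a1 :: a2 :: a3 :: a4 :: a5 :: ta, _, b0 :: b1 :: b2 :: b3 :: b4 :: b5 :: tb, _ =>
    exact compare_mac_addr_eq_alt a0 a1 a2 a3 a4 a5 b0 b1 b2 b3 b4 b5 ta tb
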